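-- pv_equiv track=rewrite | github.com/jiwoopark-ant/AlgorithmSolve | 프로그래머스/unrated/135808. 과일 장수/과일 장수.py | solution
-- ===== SOURCE A (Python) =====
-- def solution(k, m, score):
--     answer = 0
--
--     score.sort(reverse=True)
--
--     for i in range(0,len(score),m): #range(start,end,step)
--         box=score[i:i+m]
--
--         if len(box)==m: #박스크기 확인+가격
--             answer+=min(box)*m
--
--
--     return answer
-- ===== SOURCE B (Python) =====
-- def solution(k, m, score):
--     # Bucket/multiplicity algorithm: no full sort of score (only its distinct values),
--     # no chunking, no min() scans. Unlike A, B does not mutate `score` in place.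
--     counts = {}
--     for v in score:
--         counts[v] = counts.get(v, 0) + 1
--     limit = (len(score) // m) * m  # apples that end up in full boxes
--     answer = 0
--     c = 0  # apples already boxed, walking values from best to worst
--     for v in sorted(counts, reverse=True):
--         c2 = c + counts[v]
--         # box minima sit at descending positions p with p % m == m-1 and p < limit;
--         # the number of such p in [c, c2) is a floor-division difference
--         answer += v * m * (min(c2, limit) // m - min(c, limit) // m)
--         c = c2
--     return answer
-- ===== Notes on version B (the rewrite author's own statement) =====
-- stated objective: alternative
-- what changed: B replaces A's sort-whole-list / slice-each-box / min()-scan loop by a multiplicity algorithm: it builds a dict of value counts, walks the distinct values from best to worst with a running total, and counts the full-box minima falling in each value's run by a floor-division difference, so the score list is never fully sorted, sliced or scanned for minima.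
-- outside the precondition, e.g. on solution(4, -2, [3, 1, 2]): A returns 0, B returns 8
import Mathlib
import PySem

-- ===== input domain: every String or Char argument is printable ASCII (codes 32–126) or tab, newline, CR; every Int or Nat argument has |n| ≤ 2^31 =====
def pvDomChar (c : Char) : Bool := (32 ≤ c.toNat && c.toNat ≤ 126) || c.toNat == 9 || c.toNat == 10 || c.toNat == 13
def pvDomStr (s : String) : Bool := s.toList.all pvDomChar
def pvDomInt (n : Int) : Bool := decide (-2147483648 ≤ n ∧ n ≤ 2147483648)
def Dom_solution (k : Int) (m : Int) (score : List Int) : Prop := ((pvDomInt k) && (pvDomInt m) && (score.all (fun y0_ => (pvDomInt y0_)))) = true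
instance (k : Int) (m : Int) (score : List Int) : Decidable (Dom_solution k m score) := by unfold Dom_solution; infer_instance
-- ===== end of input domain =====

-- B trades A's sort/slice/min() box loop for a value-multiplicity algorithm (dict of counts,
-- walk distinct values best-to-worst, count box minima per value by a floor-division
-- difference); objective: alternative. A sorts `score` in place, B does not mutate it —
-- the equivalence proved here is about the return value.

-- ===== PORT A =====
def solution (k : Int) (m : Int) (score : List Int) : Int :=
  let s := PySem.List.sorted score (fun x => x) true
  (PySem.List.pyRange 0 s.length m).foldl (fun answer i =>
    let box := PySem.List.slice s (some i) (some (i + m))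
    if (box.length : Int) = m then
      answer + (PySem.List.min? box (fun y => y)).getD 0 * m
    else answer) 0

-- ===== PORT B =====
def solution_alt (k : Int) (m : Int) (score : List Int) : Int :=
  let counts := score.foldl (fun d v => PySem.Dict.insert d v (PySem.Dict.getD d v 0 + 1)) PySem.Dict.empty
  let limit := (PySem.Int.floordiv (score.length : Int) m) * m
  let p := (PySem.List.sorted (PySem.Dict.keys counts) (fun x => x) true).foldl
      (fun (p : Int × Int) v =>
        let c2 := p.2 + PySem.Dict.getD counts v 0
        (p.1 + v * m * (PySem.Int.floordiv (min c2 limit) m - PySem.Int.floordiv (min p.2 limit) m), c2))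
      (0, 0)
  p.1

-- ===== PRECONDITION & SPEC =====
-- Pre_ restricts to the natural domain m ≥ 1 (a positive box size): at m = 0 Python A raises
-- ValueError (range step 0), and for negative m A accidentally returns 0 from an empty range
-- while B's floor arithmetic gives a different value.
def Pre_solution (k : Int) (m : Int) (score : List Int) : Prop := 1 ≤ m
instance (k : Int) (m : Int) (score : List Int) : Decidable (Pre_solution k m score) := by unfold Pre_solution; infer_instance
def pvWitness_solution : Int × Int × List Int := (4, 3, [1, 2, 3, 1, 2, 3, 1])

def Spec_solution (k : Int) (m : Int) (score : List Int) (out : Int) : Prop := out = solution_alt k m score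
instance (k : Int) (m : Int) (score : List Int) (out : Int) : Decidable (Spec_solution k m score out) := by unfold Spec_solution; infer_instance

-- ===== CLAIM (what is proved, stated in full; the proofs are below) =====
def Claim_equal_solution : Prop := ∀ (k : Int) (m : Int) (score : List Int), Dom_solution k m score → Pre_solution k m score → Spec_solution k m score (solution k m score)

-- ===== LEMMAS AND PROOFS =====

-- ---- A-side: the fold over boxes equals m * sum of the stride-position elements ----

-- min of a descending list is its running-min fold, which is its last element
theorem foldl_min_desc (t : List Int) : ∀ (x : Int), (x :: t).Pairwise (fun a b => b ≤ a) →
    t.foldl min x = (x :: t).getLast (by simp) := by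
  induction t with
  | nil => intro x _; simp
  | cons y t' ih =>
    intro x hp
    have hyx : y ≤ x := (List.pairwise_cons.1 hp).1 y (by simp)
    have hp' : (y :: t').Pairwise (fun a b => b ≤ a) := (List.pairwise_cons.1 hp).2
    have : List.foldl min x (y :: t') = List.foldl min y t' := by
      simp [List.foldl, min_eq_right hyx]
    rw [this, ih y hp']
    simp [List.getLast_cons]

theorem min?_desc (l : List Int) (h : l ≠ []) (hp : l.Pairwise (fun a b => b ≤ a)) :
    PySem.List.min? l (fun y => y) = some (l.getLast h) := by
  cases l with
  | nil => exact absurd rfl h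
  | cons x t => rw [PySem.List.min?_id_cons, foldl_min_desc t x hp]

-- the minimum of the full box starting at a is the element at index a+mn-1
theorem min_chunk (s : List Int) (hs : s.Pairwise (fun a b => b ≤ a)) (a mn : Nat)
    (hm : 0 < mn) (hlen : a + mn ≤ s.length) :
    PySem.List.min? ((s.drop a).take mn) (fun y => y)
      = some (s[a + mn - 1]'(by omega)) := by
  have hchunklen : ((s.drop a).take mn).length = mn := by
    simp [List.length_take, List.length_drop]; omega
  have hne : (s.drop a).take mn ≠ [] := by
    intro h; rw [h] at hchunklen; simp at hchunklen; omega
  have hpc : ((s.drop a).take mn).Pairwise (fun a b => b ≤ a) :=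
    List.Pairwise.sublist ((List.take_sublist _ _).trans (List.drop_sublist _ _)) hs
  rw [min?_desc _ hne hpc]
  congr 1
  rw [List.getLast_eq_getElem]
  have h1 : ((s.drop a).take mn)[((s.drop a).take mn).length - 1]'(by omega)
      = s[a + mn - 1]'(by omega) := by
    simp only [hchunklen]
    rw [List.getElem_take, List.getElem_drop]
    congr 1; omega
  exact h1

-- A's fold on an arbitrary descending list, positive step
theorem core_pos (s : List Int) (hs : s.Pairwise (fun a b => b ≤ a)) (mn : Nat) (hm : 0 < mn) :
    (PySem.List.pyRange 0 s.length (mn : Int)).foldl (fun answer i =>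
      let box := PySem.List.slice s (some i) (some (i + (mn : Int)))
      if (box.length : Int) = (mn : Int) then
        answer + (PySem.List.min? box (fun y => y)).getD 0 * (mn : Int)
      else answer) 0
    = (mn : Int) * ((PySem.List.pyRange 0 (PySem.Int.floordiv s.length (mn : Int)) 1).map
        (fun j => PySem.List.pyGetD s ((j + 1) * (mn : Int) - 1) 0)).sum := by
  have hq := Nat.div_add_mod s.length mn
  have hr := Nat.mod_lt s.length hm
  set n' := s.length with hn'
  set q := n' / mn with hqdef
  set K := (n' + mn - 1) / mn with hKdef
  have hqK : q ≤ K := Nat.div_le_div_right (by omega)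
  have hKq := Nat.div_add_mod (n' + mn - 1) mn
  have hKr := Nat.mod_lt (n' + mn - 1) hm
  have hrangeA : PySem.List.pyRange 0 (n' : Int) (mn : Int)
      = (List.range K).map (fun k => ((mn * k : Nat) : Int)) := by
    rw [PySem.List.pyRange_of_pos 0 (n' : Int) (by exact_mod_cast hm)]
    by_cases h0 : (0 : Int) < (n' : Int)
    · rw [if_pos h0]
      have h1 : ((n' : Int) - 0 + (mn : Int) - 1) = ((n' + mn - 1 : Nat) : Int) := by
        omega
      have h2 : (((n' + mn - 1 : Nat) : Int) / (mn : Int)).toNat = K := by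
        rw [← Int.natCast_div, Int.toNat_natCast]
      rw [h1, h2]
      apply List.map_congr_left
      intro k _
      push_cast; ring
    · rw [if_neg h0]
      have hn0 : n' = 0 := by omega
      have hK0 : K = 0 := by rw [hKdef, hn0]; exact Nat.div_eq_of_lt (by omega)
      rw [hK0]; simp
  have hfloor : PySem.Int.floordiv (n' : Int) (mn : Int) = ((q : Nat) : Int) := by
    rw [PySem.Int.floordiv_eq_ediv_of_pos (by exact_mod_cast hm), hqdef, Int.natCast_div]
  have hrangeB : PySem.List.pyRange 0 ((q : Nat) : Int) 1
      = (List.range q).map (fun k => ((k : Nat) : Int)) := by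
    rw [PySem.List.pyRange_one]
    simp
  have hbody : (fun (answer : Int) (i : Int) =>
      let box := PySem.List.slice s (some i) (some (i + (mn : Int)))
      if (box.length : Int) = (mn : Int) then
        answer + (PySem.List.min? box (fun y => y)).getD 0 * (mn : Int)
      else answer)
      = (fun (answer : Int) (i : Int) => answer +
        (let box := PySem.List.slice s (some i) (some (i + (mn : Int)))
         if (box.length : Int) = (mn : Int) then
           (PySem.List.min? box (fun y => y)).getD 0 * (mn : Int)
         else 0)) := by
    funext answer i
    simp only []
    split_ifs <;> simp
  rw [hbody, PySem.List.foldl_add, hrangeA, hfloor, hrangeB, zero_add,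
      List.map_map, List.map_map]
  simp only [Function.comp_def]
  have hterm : ∀ k : Nat, k < q →
      (if (((PySem.List.slice s (some ((mn * k : Nat) : Int))
              (some (((mn * k : Nat) : Int) + (mn : Int)))).length : Nat) : Int) = (mn : Int) then
         (PySem.List.min? (PySem.List.slice s (some ((mn * k : Nat) : Int))
              (some (((mn * k : Nat) : Int) + (mn : Int)))) (fun y => y)).getD 0 * (mn : Int)
       else 0)
      = (s.getD ((k + 1) * mn - 1) 0) * (mn : Int) := by
    intro k hk
    have hfull : mn * k + mn ≤ n' := by
      have h1 : (k + 1) ≤ q := by omega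
      have h2 : (k + 1) * mn ≤ q * mn := Nat.mul_le_mul_right mn h1
      have h3 : q * mn = mn * q := Nat.mul_comm _ _
      have h4 : (k + 1) * mn = mn * k + mn := by ring
      omega
    rw [PySem.List.slice_natCast_add s (mn * k) mn]
    have hlen : (((s.drop (mn * k)).take mn).length : Int) = (mn : Int) := by
      simp [List.length_take, List.length_drop]
      omega
    rw [if_pos hlen, min_chunk s hs (mn * k) mn hm hfull]
    simp only [Option.getD_some]
    have e : mn * k + mn - 1 = (k + 1) * mn - 1 := by ring_nf
    simp only [e]
    rw [List.getD_eq_getElem s 0 (by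
      have h5 : (k + 1) * mn = mn * k + mn := by ring
      have h6 : n' = s.length := hn'
      omega)]
  have hKsplit : K = q + (K - q) := by omega
  rw [hKsplit, List.range_add, List.map_append, List.map_map, List.sum_append]
  simp only [Function.comp_def]
  have htail : ((List.range (K - q)).map (fun x =>
      (if (((PySem.List.slice s (some ((mn * (q + x) : Nat) : Int))
              (some (((mn * (q + x) : Nat) : Int) + (mn : Int)))).length : Nat) : Int) = (mn : Int) then
         (PySem.List.min? (PySem.List.slice s (some ((mn * (q + x) : Nat) : Int))
              (some (((mn * (q + x) : Nat) : Int) + (mn : Int)))) (fun y => y)).getD 0 * (mn : Int)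
       else 0))).sum = 0 := by
    apply List.sum_eq_zero
    intro y hy
    simp only [List.mem_map] at hy
    obtain ⟨x, _, hxy⟩ := hy
    rw [← hxy]
    rw [PySem.List.slice_natCast_add s (mn * (q + x)) mn]
    have hshort : ¬ ((((s.drop (mn * (q + x))).take mn).length : Int) = (mn : Int)) := by
      have h1 : q * mn = mn * q := Nat.mul_comm _ _
      have h2 : mn * (q + x) = mn * q + mn * x := by ring
      simp [List.length_take, List.length_drop]
      omega
    rw [if_neg hshort]
  rw [htail, add_zero]
  have hfun : ∀ x ∈ List.range q,
      (if (((PySem.List.slice s (some ((mn * x : Nat) : Int))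
              (some (((mn * x : Nat) : Int) + (mn : Int)))).length : Nat) : Int) = (mn : Int) then
         (PySem.List.min? (PySem.List.slice s (some ((mn * x : Nat) : Int))
              (some (((mn * x : Nat) : Int) + (mn : Int)))) (fun y => y)).getD 0 * (mn : Int)
       else 0)
      = (mn : Int) * PySem.List.pyGetD s ((((x : Nat) : Int) + 1) * (mn : Int) - 1) 0 := by
    intro x hx
    have hxq : x < q := List.mem_range.mp hx
    rw [hterm x hxq]
    have h1 : 1 ≤ (x + 1) * mn := Nat.mul_pos (Nat.succ_pos x) hm
    have hcast : ((x : Int) + 1) * (mn : Int) - 1 = (((x + 1) * mn - 1 : Nat) : Int) := by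
      push_cast [h1]
      ring
    rw [hcast, PySem.List.pyGetD_natCast]
    ring
  rw [List.map_congr_left hfun, List.sum_map_mul_left]

-- ---- canonical middle form: sum over stride positions t % mn = mn-1, t < full*mn ----

-- one full block of mn positions contains exactly one stride position, its last
theorem chunk_one (mn : Nat) (hm : 0 < mn) (q : Nat) (w : Nat → Int) :
    ((List.range mn).map (fun i => if (q * mn + i) % mn = mn - 1 then w (q * mn + i) else 0)).sum
      = w (q * mn + (mn - 1)) := by
  have hmod : ∀ i, i < mn → (q * mn + i) % mn = i := by
    intro i hi
    rw [Nat.add_comm, Nat.add_mul_mod_self_right]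
    exact Nat.mod_eq_of_lt hi
  have hcongr : ∀ i ∈ List.range mn,
      (if (q * mn + i) % mn = mn - 1 then w (q * mn + i) else 0)
        = (if i = mn - 1 then w (q * mn + i) else 0) := by
    intro i hi
    rw [hmod i (List.mem_range.mp hi)]
  rw [List.map_congr_left hcongr]
  rw [show List.range mn = List.range (mn - 1) ++ [mn - 1] by
    rw [← List.range_succ]; congr 1; omega]
  rw [List.map_append, List.sum_append]
  have hz : ((List.range (mn - 1)).map (fun i => if i = mn - 1 then w (q * mn + i) else 0)).sum = 0 := by
    apply List.sum_eq_zero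
    intro y hy
    simp only [List.mem_map, List.mem_range] at hy
    obtain ⟨i, hi, hiy⟩ := hy
    rw [← hiy, if_neg (by omega)]
  rw [hz]
  simp

-- sum over q full blocks of stride positions = sum over block indices of the block's last element
theorem blocks_sum (mn : Nat) (hm : 0 < mn) (w : Nat → Int) : ∀ (q : Nat),
    ((List.range (q * mn)).map (fun t => if t % mn = mn - 1 then w t else 0)).sum
      = ((List.range q).map (fun j => w ((j + 1) * mn - 1))).sum := by
  intro q
  induction q with
  | zero => simp
  | succ q ih =>
    have h1 : (q + 1) * mn = q * mn + mn := by ring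
    rw [h1, List.range_add, List.map_append, List.sum_append, ih, List.map_map,
        List.range_succ, List.map_append, List.sum_append]
    have h2 : ((List.range mn).map ((fun t => if t % mn = mn - 1 then w t else 0) ∘ (fun i => q * mn + i))).sum
        = w (q * mn + (mn - 1)) := by
      rw [← chunk_one mn hm q w]
      simp [Function.comp_def]
    rw [h2]
    have h3 : (q + 1) * mn - 1 = q * mn + (mn - 1) := by omega
    simp [h3]

-- extending the range past L adds nothing when the summand requires t < L
theorem range_pad (L n : Nat) (hLn : L ≤ n) (P : Nat → Prop) [DecidablePred P] (w : Nat → Int) :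
    ((List.range n).map (fun t => if t < L ∧ P t then w t else 0)).sum
      = ((List.range L).map (fun t => if P t then w t else 0)).sum := by
  have h1 : n = L + (n - L) := by omega
  rw [h1, List.range_add, List.map_append, List.sum_append, List.map_map]
  have hz : ((List.range (n - L)).map ((fun t => if t < L ∧ P t then w t else 0) ∘ (fun i => L + i))).sum = 0 := by
    apply List.sum_eq_zero
    intro y hy
    simp only [List.mem_map] at hy
    obtain ⟨i, _, hiy⟩ := hy
    simp only [Function.comp_def] at hiy
    rw [← hiy, if_neg (by omega)]
  rw [hz, add_zero]
  apply congrArg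
  apply List.map_congr_left
  intro t ht
  have := List.mem_range.mp ht
  by_cases hP : P t
  · rw [if_pos ⟨this, hP⟩, if_pos hP]
  · rw [if_neg (by tauto), if_neg hP]

-- ---- B-side: the counter fold ----

-- B's per-value term, accumulated over a list of values with a running count
def pvGroupSum (count : Int → Nat) (mn L : Nat) : List Int → Nat → Int
  | [], _ => 0
  | v :: g, c => v * (mn : Int) * (((min (c + count v) L / mn : Nat) : Int) - ((min c L / mn : Nat) : Int))
      + pvGroupSum count mn L g (c + count v)

-- one step of the floor-division difference: crossing position x adds 1 exactly at stride positions below L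
theorem step_div (mn : Nat) (hm : 0 < mn) (L x : Nat) :
    min (x + 1) L / mn = min x L / mn + (if x < L ∧ x % mn = mn - 1 then 1 else 0) := by
  by_cases hx : x < L
  · have h1 : min (x + 1) L = x + 1 := by omega
    have h2 : min x L = x := by omega
    rw [h1, h2, Nat.succ_div]
    have hdvd : (mn ∣ x + 1) ↔ (x % mn = mn - 1) := by
      have hlt := Nat.mod_lt x hm
      have hx1 : (x + 1) % mn = (x % mn + 1) % mn := by
        conv_lhs => rw [← Nat.div_add_mod x mn]
        rw [Nat.add_assoc, Nat.mul_add_mod]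
      constructor
      · intro h
        have h0 : (x + 1) % mn = 0 := Nat.dvd_iff_mod_eq_zero.mp h
        rw [hx1] at h0
        by_cases hcase : x % mn + 1 < mn
        · rw [Nat.mod_eq_of_lt hcase] at h0; omega
        · omega
      · intro h
        rw [Nat.dvd_iff_mod_eq_zero, hx1, h]
        have h2 : mn - 1 + 1 = mn := by omega
        rw [h2, Nat.mod_self]
    by_cases hd : mn ∣ x + 1
    · rw [if_pos hd, if_pos ⟨hx, hdvd.mp hd⟩]
    · rw [if_neg hd, if_neg (by intro hc; exact hd (hdvd.mpr hc.2))]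
  · have h1 : min (x + 1) L = L := by omega
    have h2 : min x L = L := by omega
    rw [h1, h2, if_neg (by intro hc; exact hx hc.1)]
    simp

-- one value's floor-division term = sum of indicators over its run of positions
theorem grp (mn : Nat) (hm : 0 < mn) (L : Nat) (v : Int) : ∀ (cnt c : Nat),
    v * (mn : Int) * (((min (c + cnt) L / mn : Nat) : Int) - ((min c L / mn : Nat) : Int))
      = ((List.range cnt).map (fun i => if c + i < L ∧ (c + i) % mn = mn - 1 then v * (mn : Int) else 0)).sum := by
  intro cnt
  induction cnt with
  | zero => intro c; simp
  | succ cnt ih =>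
    intro c
    rw [List.range_succ, List.map_append, List.sum_append, ← ih c]
    have h1 : c + (cnt + 1) = (c + cnt) + 1 := by omega
    rw [h1, step_div mn hm L (c + cnt)]
    by_cases hc : c + cnt < L ∧ (c + cnt) % mn = mn - 1
    · rw [if_pos hc]
      simp only [List.map_cons, List.map_nil, List.sum_cons, List.sum_nil, if_pos hc]
      push_cast
      ring
    · rw [if_neg hc]
      simp only [List.map_cons, List.map_nil, List.sum_cons, List.sum_nil, if_neg hc]
      push_cast
      ring

-- B's fold over the sorted distinct values IS pvGroupSum
theorem bf (cnt : Int → Nat) (mn L : Nat) (hm : 0 < mn) : ∀ (g : List Int) (acc : Int) (c : Nat),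
    (g.foldl (fun (p : Int × Int) v =>
        (p.1 + v * ((mn : Nat) : Int) * (PySem.Int.floordiv (min (p.2 + ((cnt v : Nat) : Int)) ((L : Nat) : Int)) ((mn : Nat) : Int)
            - PySem.Int.floordiv (min p.2 ((L : Nat) : Int)) ((mn : Nat) : Int)),
         p.2 + ((cnt v : Nat) : Int))) (acc, ((c : Nat) : Int))).1
    = acc + pvGroupSum cnt mn L g c := by
  intro g
  induction g with
  | nil => intro acc c; simp [pvGroupSum]
  | cons v g ih =>
    intro acc c
    simp only [List.foldl_cons]
    rw [show ((c : Nat) : Int) + ((cnt v : Nat) : Int) = (((c + cnt v : Nat) : Nat) : Int) by push_cast; ring,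
        show min (((c + cnt v : Nat) : Nat) : Int) ((L : Nat) : Int) = ((min (c + cnt v) L : Nat) : Int) by rw [Nat.cast_min],
        show min ((c : Nat) : Int) ((L : Nat) : Int) = ((min c L : Nat) : Int) by rw [Nat.cast_min],
        PySem.Int.floordiv_natCast, PySem.Int.floordiv_natCast, ih]
    simp only [pvGroupSum]
    ring

-- pvGroupSum over a run-length decomposition of the suffix of s = the indicator sum over positions
theorem flat_sum (score s : List Int) (mn L : Nat) (hm : 0 < mn) : ∀ (g : List Int) (c : Nat),
    s.drop c = g.flatMap (fun v => List.replicate (score.count v) v) →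
    pvGroupSum (fun v => score.count v) mn L g c
      = ((List.range (s.length - c)).map
          (fun i => if c + i < L ∧ (c + i) % mn = mn - 1 then s.getD (c + i) 0 * (mn : Int) else 0)).sum := by
  intro g
  induction g with
  | nil =>
    intro c hdrop
    have h1 : s.length - c = 0 := by
      have := congrArg List.length hdrop
      simp at this
      omega
    simp [pvGroupSum, h1]
  | cons v g ih =>
    intro c hdrop
    have hlen := congrArg List.length hdrop
    simp only [List.length_drop, List.flatMap_cons, List.length_append, List.length_replicate,
      List.length_flatMap] at hlen
    have hdrop2 : s.drop (c + score.count v) = g.flatMap (fun u => List.replicate (score.count u) u) := by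
      have h1 : s.drop (c + score.count v) = (s.drop c).drop (score.count v) := by
        rw [List.drop_drop, Nat.add_comm]
      rw [h1, hdrop, List.flatMap_cons]
      have h2 : (List.replicate (score.count v) v).length = score.count v := List.length_replicate
      have h3 := List.drop_left (l₁ := List.replicate (score.count v) v)
        (l₂ := g.flatMap (fun u => List.replicate (score.count u) u))
      rw [h2] at h3
      exact h3
    have hlen2 := congrArg List.length hdrop2
    simp only [List.length_drop, List.length_flatMap, List.length_replicate] at hlen2
    have hrange : s.length - c = score.count v + (s.length - (c + score.count v)) := by omega
    rw [show List.range (s.length - c)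
          = List.range (score.count v)
            ++ (List.range (s.length - (c + score.count v))).map (fun i => score.count v + i) by
        rw [← List.range_add, ← hrange]]
    rw [List.map_append, List.sum_append, List.map_map]
    simp only [pvGroupSum]
    rw [ih (c + score.count v) hdrop2]
    have hfirst : ((List.range (score.count v)).map
        (fun i => if c + i < L ∧ (c + i) % mn = mn - 1 then s.getD (c + i) 0 * (mn : Int) else 0)).sum
        = ((List.range (score.count v)).map
        (fun i => if c + i < L ∧ (c + i) % mn = mn - 1 then v * (mn : Int) else 0)).sum := by
      apply congrArg
      apply List.map_congr_left
      intro i hi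
      have hicnt : i < score.count v := List.mem_range.mp hi
      have hci : c + i < s.length := by omega
      have hget : s.getD (c + i) 0 = v := by
        rw [List.getD_eq_getElem s 0 hci]
        have h1 : s[c + i]'hci = (s.drop c)[i]'(by simp [List.length_drop]; omega) := by
          rw [List.getElem_drop]
        rw [h1]
        have h2 : (s.drop c)[i]'(by simp [List.length_drop]; omega)
            = (List.replicate (score.count v) v
                ++ g.flatMap (fun u => List.replicate (score.count u) u))[i]'(by
                simp only [List.length_append, List.length_replicate]; omega) := by
          simp only [hdrop, List.flatMap_cons]
        rw [h2, List.getElem_append_left (by simpa using hicnt), List.getElem_replicate]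
      rw [hget]
    rw [hfirst, ← grp mn hm L v (score.count v) c]
    have hsecond : ((List.range (s.length - (c + score.count v))).map
        ((fun i => if c + i < L ∧ (c + i) % mn = mn - 1 then s.getD (c + i) 0 * (mn : Int) else 0)
          ∘ (fun i => score.count v + i))).sum
        = ((List.range (s.length - (c + score.count v))).map
        (fun i => if c + score.count v + i < L ∧ (c + score.count v + i) % mn = mn - 1
            then s.getD (c + score.count v + i) 0 * (mn : Int) else 0)).sum := by
      apply congrArg
      apply List.map_congr_left
      intro i _
      simp only [Function.comp_def]
      have h1 : c + (score.count v + i) = c + score.count v + i := by omega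
      rw [h1]
    rw [hsecond]

-- counting elements of a run-length flattening over distinct values
theorem count_flat (score : List Int) : ∀ (g : List Int), g.Nodup → ∀ (a : Int),
    (g.flatMap (fun v => List.replicate (score.count v) v)).count a
      = if a ∈ g then score.count a else 0 := by
  intro g
  induction g with
  | nil => intro _ a; simp
  | cons v g ih =>
    intro hnd a
    have hnd' : g.Nodup := (List.nodup_cons.mp hnd).2
    have hvnot : v ∉ g := (List.nodup_cons.mp hnd).1
    rw [List.flatMap_cons, List.count_append, ih hnd' a, List.count_replicate]
    by_cases hav : a = v
    · subst hav
      simp [hvnot]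
    · simp [hav, Ne.symm hav]

-- the descending sort of score IS the run-length flattening of its sorted distinct values
theorem flat_eq (score : List Int) :
    PySem.List.sorted score (fun x => x) true
      = (PySem.List.sorted (PySem.Set.ofList score) (fun x => x) true).flatMap
          (fun v => List.replicate (score.count v) v) := by
  have hvs_perm : (PySem.List.sorted (PySem.Set.ofList score) (fun x => x) true).Perm
      (PySem.Set.ofList score) := PySem.List.sorted_perm _ _ _
  have hvs_nd : (PySem.List.sorted (PySem.Set.ofList score) (fun x => x) true).Nodup :=
    hvs_perm.nodup_iff.mpr (PySem.Set.nodup_ofList score)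
  have hvs_desc : (PySem.List.sorted (PySem.Set.ofList score) (fun x => x) true).Pairwise
      (fun a b => b ≤ a) := PySem.List.sorted_pairwise_rev _ _
  have hvs_strict : (PySem.List.sorted (PySem.Set.ofList score) (fun x => x) true).Pairwise
      (fun a b => b < a) :=
    (hvs_desc.and hvs_nd).imp (fun h => lt_of_le_of_ne h.1 (fun hba => h.2 hba.symm))
  have hflat_desc : ((PySem.List.sorted (PySem.Set.ofList score) (fun x => x) true).flatMap
      (fun v => List.replicate (score.count v) v)).Pairwise (fun a b => b ≤ a) := by
    rw [List.flatMap_def]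
    apply List.pairwise_flatten.mpr
    refine ⟨?_, ?_⟩
    · intro l hl
      simp only [List.mem_map] at hl
      obtain ⟨v, _, rfl⟩ := hl
      exact List.pairwise_replicate.mpr (Or.inr le_rfl)
    · rw [List.pairwise_map]
      refine hvs_strict.imp_of_mem ?_
      intro a b _ _ hba
      intro x hx y hy
      rw [List.eq_of_mem_replicate hx, List.eq_of_mem_replicate hy]
      exact le_of_lt hba
  have hflat_perm : ((PySem.List.sorted (PySem.Set.ofList score) (fun x => x) true).flatMap
      (fun v => List.replicate (score.count v) v)).Perm score := by
    rw [List.perm_iff_count]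
    intro a
    rw [count_flat score _ hvs_nd a]
    by_cases ha : a ∈ score
    · rw [if_pos (by rw [PySem.List.mem_sorted]; exact (PySem.Set.mem_ofList _ _).mpr ha)]
    · rw [if_neg (by rw [PySem.List.mem_sorted, PySem.Set.mem_ofList]; exact ha),
        (List.count_eq_zero).mpr ha]
  have hs_perm : (PySem.List.sorted score (fun x => x) true).Perm score :=
    PySem.List.sorted_perm _ _ _
  have hs_desc : (PySem.List.sorted score (fun x => x) true).Pairwise (fun a b => b ≤ a) :=
    PySem.List.sorted_pairwise_rev _ _
  exact PySem.List.eq_of_perm_of_pairwise_le_of_injective (fun x : Int => -x) neg_injective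
    (hs_perm.trans hflat_perm.symm)
    (hs_desc.imp (fun h => neg_le_neg h))
    (hflat_desc.imp (fun h => neg_le_neg h))

-- ===== VERDICT (by name: the statement is the Claim_ definition above) =====
theorem solution_spec : Claim_equal_solution := by
  intro k m score _ hpre
  unfold Pre_solution at hpre
  obtain ⟨mn, rfl⟩ : ∃ mn : Nat, m = (mn : Int) := ⟨m.toNat, by omega⟩
  have hm : 0 < mn := by exact_mod_cast hpre
  unfold Spec_solution
  simp only [solution, solution_alt]
  have hs_desc : (PySem.List.sorted score (fun x => x) true).Pairwise (fun a b => b ≤ a) :=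
    PySem.List.sorted_pairwise_rev _ _
  set s := PySem.List.sorted score (fun x => x) true with hsdef
  have hslen : s.length = score.length := PySem.List.length_sorted _ _ _
  -- A side: fold over boxes = sum of stride-position elements over the full blocks
  have hA := core_pos s hs_desc mn hm
  rw [hA]
  have hfloor : PySem.Int.floordiv ((s.length : Nat) : Int) ((mn : Nat) : Int)
      = ((s.length / mn : Nat) : Int) := PySem.Int.floordiv_natCast _ _
  rw [hfloor]
  have hrange : PySem.List.pyRange 0 ((s.length / mn : Nat) : Int) 1
      = (List.range (s.length / mn)).map (fun j => ((j : Nat) : Int)) := by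
    rw [PySem.List.pyRange_one]
    simp
    rw [← Int.natCast_div, Int.toNat_natCast]
  rw [hrange, List.map_map]
  have hterms : ∀ j ∈ List.range (s.length / mn),
      ((fun j => PySem.List.pyGetD s ((j + 1) * ((mn : Nat) : Int) - 1) 0) ∘ (fun j : Nat => ((j : Nat) : Int))) j
        = s.getD ((j + 1) * mn - 1) 0 := by
    intro j _
    simp only [Function.comp_def]
    have h1 : 1 ≤ (j + 1) * mn := Nat.mul_pos (Nat.succ_pos j) hm
    have hcast : ((j : Int) + 1) * ((mn : Nat) : Int) - 1 = (((j + 1) * mn - 1 : Nat) : Int) := by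
      push_cast [h1]
      ring
    rw [hcast, PySem.List.pyGetD_natCast]
  rw [List.map_congr_left hterms]
  have hmul : ((mn : Nat) : Int) * ((List.range (s.length / mn)).map (fun j => s.getD ((j + 1) * mn - 1) 0)).sum
      = ((List.range (s.length / mn)).map (fun j => s.getD ((j + 1) * mn - 1) 0 * ((mn : Nat) : Int))).sum := by
    rw [← List.sum_map_mul_left]
    apply congrArg
    apply List.map_congr_left
    intro j _
    ring
  rw [hmul, ← blocks_sum mn hm (fun t => s.getD t 0 * ((mn : Nat) : Int)) (s.length / mn)]
  -- B side: counter fold = pvGroupSum = the same indicator sum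
  rw [PySem.Dict.foldl_insert_getD_add_one_eq_counter, PySem.Dict.keys_counter]
  simp only [PySem.Dict.getD_counter]
  rw [show PySem.Int.floordiv ((score.length : Nat) : Int) ((mn : Nat) : Int) * ((mn : Nat) : Int)
        = ((score.length / mn * mn : Nat) : Int) by
      rw [PySem.Int.floordiv_natCast, ← Nat.cast_mul]]
  have hB := bf (fun v => score.count v) mn (score.length / mn * mn) hm
    (PySem.List.sorted (PySem.Set.ofList score) (fun x => x) true) 0 0
  simp only [Nat.cast_zero, zero_add] at hB
  rw [hB]
  have hdrop0 : s.drop 0 = (PySem.List.sorted (PySem.Set.ofList score) (fun x => x) true).flatMap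
      (fun v => List.replicate (score.count v) v) := by
    rw [List.drop_zero, hsdef]
    exact flat_eq score
  rw [flat_sum score s mn (score.length / mn * mn) hm
    (PySem.List.sorted (PySem.Set.ofList score) (fun x => x) true) 0 hdrop0]
  simp only [Nat.sub_zero, zero_add, hslen]
  exact (range_pad (score.length / mn * mn) score.length (Nat.div_mul_le_self _ _)
    (fun t => t % mn = mn - 1) (fun t => s.getD t 0 * ((mn : Nat) : Int))).symm
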